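-- pv_equiv track=rewrite | github.com/MelvinjoseC/Qc-checking-inventor-app | app.py | remove_table_snippets_from_pages
-- ===== SOURCE A (Python) =====
-- def remove_table_snippets_from_pages(page_texts, snippets):
--     if not page_texts or not snippets:
--         return page_texts
--     page_map = {}
--     for page_idx, snippet in snippets:
--         if not snippet:
--             continue
--         page_map.setdefault(page_idx, []).append(snippet.lower())
--     cleaned = []
--     for idx, text in enumerate(page_texts, start=1):
--         lowers = page_map.get(idx)
--         if not lowers:
--             cleaned.append(text)
--             continue
--         lines = text.splitlines()
--         kept = []
--         for line in lines:
--             lower = line.lower()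
--             if any(snippet in lower for snippet in lowers):
--                 continue
--             kept.append(line)
--         cleaned.append("\n".join(kept))
--     return cleaned
-- ===== SOURCE B (Python) =====
-- def remove_table_snippets_from_pages(page_texts, snippets):
--     if not page_texts or not snippets:
--         return page_texts
--     pages = list(page_texts)
--     split = {}  # 0-based page index -> current surviving line list (split on demand)
--     for i, s in snippets:
--         if s and 1 <= i <= len(pages):
--             j = i - 1
--             lines = split[j] if j in split else pages[j].splitlines()
--             needle = s.lower()
--             split[j] = [ln for ln in lines if needle not in ln.lower()]
--     for j, lines in split.items():
--         pages[j] = "\n".join(lines)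
--     return pages
-- ===== Notes on version B (the rewrite author's own statement) =====
-- stated objective: alternative
-- what changed: B is snippet-major: a single pass over the snippets lazily splits a page into lines on the first snippet that targets it and immediately filters that cached line list per snippet (no per-page snippet grouping and no any() over a snippet group), then one write-back pass rejoins only the touched pages; A is page-major with a dict of grouped snippets per page.
import Mathlib
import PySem

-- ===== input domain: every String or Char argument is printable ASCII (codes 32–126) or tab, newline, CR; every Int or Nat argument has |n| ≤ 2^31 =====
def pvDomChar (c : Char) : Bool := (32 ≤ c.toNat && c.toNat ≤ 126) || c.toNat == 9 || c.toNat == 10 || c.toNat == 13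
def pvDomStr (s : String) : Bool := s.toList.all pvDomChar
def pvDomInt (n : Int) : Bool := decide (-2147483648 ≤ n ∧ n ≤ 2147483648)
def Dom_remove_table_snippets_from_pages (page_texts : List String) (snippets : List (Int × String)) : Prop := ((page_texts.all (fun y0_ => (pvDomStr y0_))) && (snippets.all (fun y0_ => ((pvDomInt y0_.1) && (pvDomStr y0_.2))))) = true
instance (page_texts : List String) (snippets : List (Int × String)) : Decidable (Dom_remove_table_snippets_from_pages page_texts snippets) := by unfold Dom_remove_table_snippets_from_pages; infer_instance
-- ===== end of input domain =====

-- B is snippet-major: one pass over the snippets lazily splits a targeted page and filters its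
-- cached line list per snippet, then a write-back pass rejoins touched pages (objective:
-- alternative, same cost). Same return value everywhere.
-- ===== PORT A =====
def remove_table_snippets_from_pages (page_texts : List String) (snippets : List (Int × String)) : List String :=
  if page_texts = [] ∨ snippets = [] then page_texts
  else
    -- page_map: setdefault(page_idx, []).append(snippet.lower()) == modify with default []
    let page_map : PySem.Dict Int (List String) :=
      snippets.foldl (fun d p =>
        if p.2 = "" then d
        else d.modify p.1 [] (fun l => l ++ [PySem.Str.lower p.2])) PySem.Dict.empty
    (PySem.List.enumerate page_texts 1).foldl (fun cleaned p =>
      -- page_map.get(idx) returns None or the list; 'if not lowers' treats both None and [] alike,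
      -- so it is ported as getD with default []
      let lowers := page_map.getD p.1 []
      if lowers = [] then cleaned ++ [p.2]
      else
        let lines := PySem.Str.splitlines p.2
        let kept := lines.foldl (fun kept line =>
          let lower := PySem.Str.lower line
          if lowers.any (fun s => PySem.Str.isIn s lower) then kept
          else kept ++ [line]) []
        cleaned ++ [PySem.Str.join "\n" kept]) []

-- ===== PORT B =====
def remove_table_snippets_from_pages_alt (page_texts : List String) (snippets : List (Int × String)) : List String :=
  if page_texts = [] ∨ snippets = [] then page_texts
  else
    -- split: 0-based index -> surviving line list; 'split[j] if j in split else pages[j].splitlines()'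
    -- is get? with the splitlines default (pages[j] is in range under the guard, so pyGet?'s
    -- fallback "" is never used)
    let split : PySem.Dict Int (List String) :=
      snippets.foldl (fun d p =>
        if p.2 ≠ "" ∧ 1 ≤ p.1 ∧ p.1 ≤ (page_texts.length : Int) then
          let j := p.1 - 1
          let lines := (d.get? j).getD
            (PySem.Str.splitlines ((PySem.List.pyGet? page_texts j).getD ""))
          d.insert j (lines.filter (fun ln =>
            ! PySem.Str.isIn (PySem.Str.lower p.2) (PySem.Str.lower ln)))
        else d) PySem.Dict.empty
    split.items.foldl (fun ps q => ps.set q.1.toNat (PySem.Str.join "\n" q.2)) page_texts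

-- ===== PRECONDITION & SPEC =====
def Spec_remove_table_snippets_from_pages (page_texts : List String) (snippets : List (Int × String)) (out : List String) : Prop := out = remove_table_snippets_from_pages_alt page_texts snippets
instance (page_texts : List String) (snippets : List (Int × String)) (out : List String) : Decidable (Spec_remove_table_snippets_from_pages page_texts snippets out) := by unfold Spec_remove_table_snippets_from_pages; infer_instance

-- ===== CLAIM (what is proved, stated in full; the proofs are below) =====
def Claim_equal_remove_table_snippets_from_pages : Prop := ∀ (page_texts : List String) (snippets : List (Int × String)), Dom_remove_table_snippets_from_pages page_texts snippets → Spec_remove_table_snippets_from_pages page_texts snippets (remove_table_snippets_from_pages page_texts snippets)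

-- ===== LEMMAS AND PROOFS =====

-- the (lowered, nonempty) snippets aimed at page i, in snippet order
def pvPats (snippets : List (Int × String)) (i : Int) : List String :=
  (snippets.filter (fun q => q.1 == i && q.2 != "")).map (fun q => PySem.Str.lower q.2)

def pvKeep (ps : List String) (ln : String) : Bool :=
  ! ps.any (fun s => PySem.Str.isIn s (PySem.Str.lower ln))

-- A's dict-building loop, with its empty-snippet skip, is the plain modify-append loop over the
-- filtered, lowered snippet list.
theorem pvFoldEq (s : List (Int × String)) (d : PySem.Dict Int (List String)) :
    s.foldl (fun d p =>
        if p.2 = "" then d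
        else d.modify p.1 [] (fun l => l ++ [PySem.Str.lower p.2])) d
    = ((s.filter (fun p => p.2 != "")).map (fun p => (p.1, PySem.Str.lower p.2))).foldl
        (fun d p => d.modify p.1 [] (fun l => l ++ [p.2])) d := by
  induction s generalizing d with
  | nil => rfl
  | cons p t ih =>
    by_cases h : p.2 = "" <;> simp [List.foldl_cons, h, ih]

-- filter/map bookkeeping: selecting key i from the filtered-lowered pair list is pvPats.
theorem pvPatsEq (s : List (Int × String)) (i : Int) :
    List.map (fun x => x.2)
      (List.filter (fun p => p.1 == i)
        ((s.filter (fun p => p.2 != "")).map (fun p => (p.1, PySem.Str.lower p.2))))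
    = pvPats s i := by
  induction s with
  | nil => rfl
  | cons p t ih =>
    by_cases h1 : p.2 = "" <;> by_cases h2 : p.1 = i <;> simp [pvPats, h1, h2] <;>
      simpa [pvPats] using ih

-- A's kept-lines accumulator loop is a filter.
theorem pvKeptEq (pats lines acc : List String) :
    lines.foldl (fun kept line =>
        if pats.any (fun s => PySem.Str.isIn s (PySem.Str.lower line)) then kept
        else kept ++ [line]) acc
    = acc ++ lines.filter (pvKeep pats) := by
  have hfun : (fun (kept : List String) line =>
      if pats.any (fun s => PySem.Str.isIn s (PySem.Str.lower line)) then kept else kept ++ [line])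
      = (fun kept line => if pvKeep pats line = true then kept ++ [(fun l => l) line] else kept) := by
    funext kept line
    unfold pvKeep
    cases h : pats.any (fun s => PySem.Str.isIn s (PySem.Str.lower line)) <;> simp
  rw [hfun, PySem.List.foldl_append_if]
  simp

theorem pvEnumGet (l : List String) (k : Nat) :
    (PySem.List.enumerate l 1)[k]? = l[k]?.map (fun x => (((k : Int) + 1), x)) := by
  simp; ring_nf

-- B's snippet loop, characterised per key: page j's entry exists iff j is in range and some
-- nonempty snippet targets it, and it then holds the fully filtered line list.
theorem pvSplitGet (pages : List String) (s : List (Int × String))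
    (d : PySem.Dict Int (List String)) (j : Int) :
    (s.foldl (fun d p =>
        if p.2 ≠ "" ∧ 1 ≤ p.1 ∧ p.1 ≤ (pages.length : Int) then
          let j := p.1 - 1
          let lines := (d.get? j).getD
            (PySem.Str.splitlines ((PySem.List.pyGet? pages j).getD ""))
          d.insert j (lines.filter (fun ln =>
            ! PySem.Str.isIn (PySem.Str.lower p.2) (PySem.Str.lower ln)))
        else d) d).get? j
    = if (0 ≤ j ∧ j < (pages.length : Int)) ∧ pvPats s (j + 1) ≠ [] then
        some (((d.get? j).getD
            (PySem.Str.splitlines ((PySem.List.pyGet? pages j).getD ""))).filter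
          (pvKeep (pvPats s (j + 1))))
      else d.get? j := by
  induction s generalizing d with
  | nil => simp [pvPats]
  | cons p t ih =>
    rw [List.foldl_cons]
    by_cases hg : p.2 ≠ "" ∧ 1 ≤ p.1 ∧ p.1 ≤ (pages.length : Int)
    · rw [if_pos hg]
      by_cases hj : j = p.1 - 1
      · subst hj
        have hin : 0 ≤ p.1 - 1 ∧ p.1 - 1 < (pages.length : Int) := by omega
        have hpi : p.1 - 1 + 1 = p.1 := by omega
        rw [ih]
        simp only [hpi] at *
        have hpats : pvPats (p :: t) p.1 = PySem.Str.lower p.2 :: pvPats t p.1 := by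
          simp [pvPats, hg.1]
        simp only [PySem.Dict.get?_insert_self, Option.getD_some]
        by_cases ht : pvPats t p.1 = []
        · rw [if_neg (by simp [ht]), if_pos ⟨hin, by simp [hpats]⟩, hpats, ht]
          congr 1
          apply List.filter_congr
          intro ln _
          simp [pvKeep]
        · rw [if_pos ⟨hin, ht⟩, if_pos ⟨hin, by simp [hpats]⟩]
          rw [List.filter_filter, hpats]
          congr 1
          apply List.filter_congr
          intro ln _
          simp [pvKeep, Bool.and_comm]
      · have hne : j ≠ p.1 - 1 := hj
        have hpats : pvPats (p :: t) (j + 1) = pvPats t (j + 1) := by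
          have : ¬ p.1 = j + 1 := by omega
          simp [pvPats, this]
        rw [ih, hpats, PySem.Dict.get?_insert, if_neg hne]
    · rw [if_neg hg]
      by_cases hin : 0 ≤ j ∧ j < (pages.length : Int)
      · have hpats : pvPats (p :: t) (j + 1) = pvPats t (j + 1) := by
          by_cases hpj : p.1 = j + 1
          · by_cases hs : p.2 = ""
            · simp [pvPats, hs]
            · exact absurd ⟨hs, by omega, by omega⟩ hg
          · simp [pvPats, hpj]
        rw [ih, hpats]
      · rw [ih, if_neg (by tauto), if_neg (by tauto)]

-- the snippet loop keeps the key list duplicate-free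
theorem pvSplitNodup (pages : List String) (s : List (Int × String))
    (d : PySem.Dict Int (List String)) (hd : d.keys.Nodup) :
    (s.foldl (fun d p =>
        if p.2 ≠ "" ∧ 1 ≤ p.1 ∧ p.1 ≤ (pages.length : Int) then
          let j := p.1 - 1
          let lines := (d.get? j).getD
            (PySem.Str.splitlines ((PySem.List.pyGet? pages j).getD ""))
          d.insert j (lines.filter (fun ln =>
            ! PySem.Str.isIn (PySem.Str.lower p.2) (PySem.Str.lower ln)))
        else d) d).keys.Nodup := by
  induction s generalizing d with
  | nil => exact hd
  | cons p t ih =>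
    rw [List.foldl_cons]
    by_cases hg : p.2 ≠ "" ∧ 1 ≤ p.1 ∧ p.1 ≤ (pages.length : Int)
    · rw [if_pos hg]; exact ih _ (PySem.Dict.nodup_keys_insert _ _ _ hd)
    · rw [if_neg hg]; exact ih _ hd

-- the write-back loop over an association list with distinct in-range keys, read back per index
theorem pvWriteBack (L : List (Int × List String)) (pages : List String)
    (hb : ∀ p ∈ L, 0 ≤ p.1 ∧ p.1 < (pages.length : Int))
    (hnd : (L.map Prod.fst).Nodup) (k : Nat) :
    (L.foldl (fun ps q => ps.set q.1.toNat (PySem.Str.join "\n" q.2)) pages)[k]?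
    = match (PySem.Dict.mk L).get? (k : Int) with
      | some l => some (PySem.Str.join "\n" l)
      | none => pages[k]? := by
  induction L generalizing pages with
  | nil =>
    rw [show (PySem.Dict.mk ([] : List (Int × List String))) = PySem.Dict.empty from rfl,
      PySem.Dict.get?_empty]
    simp
  | cons q t ih =>
    rw [List.foldl_cons]
    have hq := hb q (by simp)
    have hlen : ((pages.set q.1.toNat (PySem.Str.join "\n" q.2)).length : Int)
        = (pages.length : Int) := by simp
    rw [ih _ (fun p hp => by rw [hlen]; exact hb p (List.mem_cons_of_mem _ hp))
        (by simpa using hnd.of_cons)]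
    rw [PySem.Dict.get?_mk_cons]
    by_cases hk : q.1 = (k : Int)
    · have hkeys : ¬ ((k : Int) ∈ t.map Prod.fst) := by
        have := (List.nodup_cons.mp hnd).1
        simpa [hk] using this
      have hnone : (PySem.Dict.mk t).get? (k : Int) = none := by
        rw [PySem.Dict.get?_eq_none_iff_not_mem_keys]
        simpa [PySem.Dict.keys] using hkeys
      rw [hnone]
      have hkk : q.1.toNat = k := by omega
      simp [hk, show k < pages.length by omega]
    · have hkk : q.1.toNat ≠ k := by omega
      simp only [beq_iff_eq, if_neg hk]
      cases h : (PySem.Dict.mk t).get? (k : Int) <;>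
        simp [hkk]

-- ===== VERDICT (by name: the statement is the Claim_ definition above) =====
theorem remove_table_snippets_from_pages_spec : Claim_equal_remove_table_snippets_from_pages := by
  intro page_texts snippets _
  unfold Spec_remove_table_snippets_from_pages
  by_cases h : page_texts = [] ∨ snippets = []
  · simp [remove_table_snippets_from_pages, remove_table_snippets_from_pages_alt, h]
  · simp only [remove_table_snippets_from_pages, remove_table_snippets_from_pages_alt, if_neg h]
    rw [pvFoldEq]
    -- A collapses to a map over the enumerated pages
    have houter : ∀ (acc : List String),
        (PySem.List.enumerate page_texts 1).foldl (fun cleaned p =>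
          let lowers := (((snippets.filter (fun p => p.2 != "")).map
              (fun p => (p.1, PySem.Str.lower p.2))).foldl
              (fun d p => d.modify p.1 [] (fun l => l ++ [p.2])) PySem.Dict.empty).getD p.1 []
          if lowers = [] then cleaned ++ [p.2]
          else
            let lines := PySem.Str.splitlines p.2
            let kept := lines.foldl (fun kept line =>
              let lower := PySem.Str.lower line
              if lowers.any (fun s => PySem.Str.isIn s lower) then kept
              else kept ++ [line]) []
            cleaned ++ [PySem.Str.join "\n" kept]) acc
        = acc ++ (PySem.List.enumerate page_texts 1).map (fun p =>
            if pvPats snippets p.1 = [] then p.2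
            else PySem.Str.join "\n"
              ((PySem.Str.splitlines p.2).filter (pvKeep (pvPats snippets p.1)))) := by
      intro acc
      have hbody : ∀ (acc : List String) (p : Int × String),
          (let lowers := (((snippets.filter (fun p => p.2 != "")).map
              (fun p => (p.1, PySem.Str.lower p.2))).foldl
              (fun d p => d.modify p.1 [] (fun l => l ++ [p.2])) PySem.Dict.empty).getD p.1 []
          if lowers = [] then acc ++ [p.2]
          else
            let lines := PySem.Str.splitlines p.2
            let kept := lines.foldl (fun kept line =>
              let lower := PySem.Str.lower line
              if lowers.any (fun s => PySem.Str.isIn s lower) then kept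
              else kept ++ [line]) []
            acc ++ [PySem.Str.join "\n" kept])
          = acc ++ [(fun p : Int × String =>
              if pvPats snippets p.1 = [] then p.2
              else PySem.Str.join "\n"
                ((PySem.Str.splitlines p.2).filter (pvKeep (pvPats snippets p.1)))) p] := by
        intro acc p
        simp only [PySem.Dict.getD_foldl_modify_append, PySem.Dict.getD_empty, pvPatsEq,
          List.nil_append]
        by_cases hp : pvPats snippets p.1 = []
        · simp [hp]
        · simp only [if_neg hp, pvKeptEq, List.nil_append]
      induction (PySem.List.enumerate page_texts 1) generalizing acc with
      | nil => simp
      | cons p t ih =>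
        rw [List.foldl_cons, List.map_cons, hbody acc p, ih]
        simp
    rw [houter, List.nil_append]
    -- compare the two sides index by index
    apply List.ext_getElem?
    intro k
    rw [List.getElem?_map, pvEnumGet]
    rw [pvWriteBack _ page_texts
      (fun p hp => by
        have hnd := pvSplitNodup page_texts snippets PySem.Dict.empty (by simp)
        have hg := PySem.Dict.get?_of_mem_items _ hp hnd
        rw [pvSplitGet] at hg
        by_cases hin : (0 ≤ p.1 ∧ p.1 < (page_texts.length : Int)) ∧
            pvPats snippets (p.1 + 1) ≠ []
        · exact hin.1
        · rw [if_neg hin, PySem.Dict.get?_empty] at hg; cases hg)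
      (by
        have hnd := pvSplitNodup page_texts snippets PySem.Dict.empty (by simp)
        simpa [PySem.Dict.keys] using hnd) k]
    have heta : ∀ (d : PySem.Dict Int (List String)), PySem.Dict.mk d.items = d := by
      intro d; rfl
    rw [heta]
    rw [pvSplitGet page_texts snippets PySem.Dict.empty (k : Int)]
    by_cases hk : k < page_texts.length
    · by_cases hp : pvPats snippets ((k : Int) + 1) = []
      · rw [if_neg (by simp [hp]), PySem.Dict.get?_empty]
        simp [List.getElem?_eq_getElem hk, hp]
      · rw [if_pos ⟨⟨by omega, by omega⟩, hp⟩]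
        simp [PySem.List.pyGet?_natCast, List.getElem?_eq_getElem hk, hp]
    · have hnone : page_texts[k]? = none := List.getElem?_eq_none (by omega)
      rw [if_neg (by omega), PySem.Dict.get?_empty]
      simp [hnone]
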